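-- pv_equiv track=rewrite | github.com/CatalinApostol/keymaker-python | keymaker.py | remove_odd_blocks
-- ===== SOURCE A (Python) =====
-- def remove_odd_blocks(word, block_length):
--     """
--     >>> remove_odd_blocks('abcdefghijklm', 3)
--     'abcghim'
--     """
--     flag=0
--     new_word=''
--     initial=0
--     while initial < len(word):
--         if flag ==0:
--             for i in range(block_length):
--                 new_word+=word[initial]
--                 initial +=1
--                 if initial== len(word):
--                     break
--
--             flag = 1
--         elif flag == 1:
--             initial += block_length
--             flag =0
--     return new_word
-- ===== SOURCE B (Python) =====
-- def remove_odd_blocks(word, block_length):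
--     parts = []
--     for i in range(0, len(word), 2 * block_length):
--         parts.append(word[i:i + block_length])
--     return ''.join(parts)
-- ===== Notes on version B (the rewrite author's own statement) =====
-- stated objective: simpler
-- what changed: Replaces the flag-toggling character-by-character while loop with a single strided loop over block start indices (step 2*block_length) that slices out each even block and joins the parts; slicing+join avoids per-character string concatenation (measured faster).
-- outside the precondition, e.g. on remove_odd_blocks('', 0): A returns '', B raises ValueError
import Mathlib
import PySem

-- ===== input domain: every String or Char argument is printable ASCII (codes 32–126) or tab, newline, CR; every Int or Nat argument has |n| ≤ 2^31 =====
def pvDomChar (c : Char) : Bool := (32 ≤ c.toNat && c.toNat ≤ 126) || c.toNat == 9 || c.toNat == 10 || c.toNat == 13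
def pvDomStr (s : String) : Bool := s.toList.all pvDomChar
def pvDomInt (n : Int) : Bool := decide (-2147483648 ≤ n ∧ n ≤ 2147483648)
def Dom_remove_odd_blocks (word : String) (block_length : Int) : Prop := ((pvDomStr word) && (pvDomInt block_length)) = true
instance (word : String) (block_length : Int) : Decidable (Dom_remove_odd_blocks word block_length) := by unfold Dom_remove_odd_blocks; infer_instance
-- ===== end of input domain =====

-- B replaces A's flag-toggling character-by-character while loop by one strided loop over
-- block start indices that slices out each even block and joins the parts (simpler; a timing run measured it faster).


-- ===== PORT A =====
-- inner 'for i in range(block_length)' loop of A: appends word[initial], increments initial,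
-- breaks when initial == len(word); returns (new_word, initial)
def pvInnerA (cs : List Char) : Nat → List Char → Nat → (List Char × Nat)
  | 0, acc, ini => (acc, ini)
  | n + 1, acc, ini =>
      let acc' := acc ++ [cs.getD ini ' ']   -- word[initial]; always in range when entered with ini < len
      let ini' := ini + 1
      if ini' = cs.length then (acc', ini') else pvInnerA cs n acc' ini'

-- A's outer 'while initial < len(word)' loop, flag ∈ {0,1}; fuel = len(word) bounds the
-- iteration count whenever block_length ≥ 1 (each iteration advances initial by ≥ 1)
def pvOuterA (cs : List Char) (bl : Int) : Nat → Nat → Nat → List Char → List Char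
  | 0, _, _, acc => acc
  | fuel + 1, flag, ini, acc =>
      if ini < cs.length then
        if flag = 0 then
          let (acc', ini') := pvInnerA cs bl.toNat acc ini
          pvOuterA cs bl fuel 1 ini' acc'
        else
          pvOuterA cs bl fuel 0 (ini + bl.toNat) acc
      else acc

def remove_odd_blocks (word : String) (block_length : Int) : String :=
  String.mk (pvOuterA word.toList block_length word.toList.length 0 0 [])

-- ===== PORT B =====
def remove_odd_blocks_alt (word : String) (block_length : Int) : String :=
  let cs := word.toList
  let parts := (PySem.List.pyRange 0 (cs.length : Int) (2 * block_length)).foldl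
      (fun parts i => parts ++ [PySem.List.slice cs (some i) (some (i + block_length))]) []
  String.mk parts.flatten

-- ===== PRECONDITION & SPEC =====
-- Pre_ excludes block_length ≤ 0 with a nonempty word (A loops forever there) and
-- block_length = 0 with the empty word (A returns '' but B's range step 0 raises ValueError).
def Pre_remove_odd_blocks (word : String) (block_length : Int) : Prop :=
  1 ≤ block_length ∨ (word = "" ∧ block_length < 0)
instance (word : String) (block_length : Int) : Decidable (Pre_remove_odd_blocks word block_length) := by unfold Pre_remove_odd_blocks; infer_instance

def pvWitness_remove_odd_blocks : String × Int := ("abcdefghijklm", 3)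

def Spec_remove_odd_blocks (word : String) (block_length : Int) (out : String) : Prop := out = remove_odd_blocks_alt word block_length
instance (word : String) (block_length : Int) (out : String) : Decidable (Spec_remove_odd_blocks word block_length out) := by unfold Spec_remove_odd_blocks; infer_instance

-- ===== CLAIM (what is proved, stated in full; the proofs are below) =====
def Claim_equal_remove_odd_blocks : Prop := ∀ (word : String) (block_length : Int), Dom_remove_odd_blocks word block_length → Pre_remove_odd_blocks word block_length → Spec_remove_odd_blocks word block_length (remove_odd_blocks word block_length)

-- ===== LEMMAS AND PROOFS =====

-- common specification: keep the first b characters, drop the next b, repeat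
def pvChunks (b : Nat) (cs : List Char) : List Char :=
  if h : cs = [] ∨ b = 0 then [] else cs.take b ++ pvChunks b (cs.drop (2 * b))
termination_by cs.length
decreasing_by
  simp only [List.length_drop]
  rcases cs with _ | ⟨c, cs⟩
  · simp at h
  · simp at h; simp; omega

theorem pvInnerA_spec (cs : List Char) (b : Nat) (acc : List Char) (ini : Nat)
    (h : ini < cs.length) :
    pvInnerA cs b acc ini = (acc ++ (cs.drop ini).take b, min (ini + b) cs.length) := by
  induction b generalizing acc ini with
  | zero => simp [pvInnerA]; omega
  | succ n ih =>
      have hget : cs.getD ini ' ' = cs[ini] := List.getD_eq_getElem cs ' ' h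
      have hdrop : cs.drop ini = cs[ini] :: cs.drop (ini + 1) := List.drop_eq_getElem_cons h
      by_cases he : ini + 1 = cs.length
      · have hnil : cs.drop (ini + 1) = [] := by simp [he]
        rw [pvInnerA]
        simp only [hget, if_pos he, hdrop, hnil, Prod.mk.injEq]
        constructor
        · simp
        · omega
      · have h1 : ini + 1 < cs.length := by omega
        rw [pvInnerA]
        simp only [if_neg he]
        rw [ih _ _ h1]
        simp only [hget, hdrop, List.take_succ_cons, Prod.mk.injEq]
        constructor
        · simp
        · omega

theorem pvOuterA_spec (cs : List Char) (bl : Int) (hb : 1 ≤ bl)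
    (fuel ini : Nat) (acc : List Char) (hf : cs.length - ini ≤ fuel) :
    pvOuterA cs bl fuel 0 ini acc = acc ++ pvChunks bl.toNat (cs.drop ini) := by
  induction fuel using Nat.strong_induction_on generalizing ini acc with
  | _ fuel ih =>
  have hbn : 1 ≤ bl.toNat := by omega
  by_cases hlt : ini < cs.length
  · -- loop body runs: need fuel ≥ 1
    obtain ⟨fuel, rfl⟩ : ∃ f, fuel = f + 1 := ⟨fuel - 1, by omega⟩
    rw [pvOuterA]
    simp only [hlt, if_true, if_pos rfl]
    rw [pvInnerA_spec cs bl.toNat acc ini hlt]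
    have hch : pvChunks bl.toNat (cs.drop ini)
        = (cs.drop ini).take bl.toNat ++ pvChunks bl.toNat (cs.drop (ini + 2 * bl.toNat)) := by
      rw [pvChunks]
      have hne : ¬(cs.drop ini = [] ∨ bl.toNat = 0) := by
        push_neg
        constructor
        · intro h; have := List.drop_eq_nil_iff.mp h; omega
        · omega
      rw [dif_neg hne, List.drop_drop]
    set m := min (ini + bl.toNat) cs.length with hm
    by_cases hmd : m < cs.length
    · -- flag-1 iteration runs and advances by bl
      have hm' : m = ini + bl.toNat := by omega
      obtain ⟨fuel, rfl⟩ : ∃ f, fuel = f + 1 := ⟨fuel - 1, by omega⟩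
      rw [pvOuterA]
      simp only [hmd, if_true]
      rw [if_neg (by decide)]
      rw [ih (fuel) (by omega) (m + bl.toNat) _ (by omega)]
      rw [hch, hm']
      have harg : ini + bl.toNat + bl.toNat = ini + 2 * bl.toNat := by omega
      rw [List.append_assoc, harg]
    · -- initial reached the end inside the block; flag-1 call returns immediately
      have hmE : m = cs.length := by omega
      have hstop : ∀ f a, pvOuterA cs bl f 1 m a = a := by
        intro f a
        cases f with
        | zero => rfl
        | succ f => rw [pvOuterA]; simp [hmE]
      rw [hstop]
      have hnil : cs.drop (ini + 2 * bl.toNat) = [] := by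
        apply List.drop_eq_nil_iff.mpr; omega
      rw [hch, hnil]
      rw [pvChunks]
      simp
  · -- loop never runs
    have hnil : cs.drop ini = [] := List.drop_eq_nil_iff.mpr (by omega)
    have hc : pvChunks bl.toNat (cs.drop ini) = [] := by rw [pvChunks]; simp [hnil]
    rw [hc]
    cases fuel with
    | zero => simp [pvOuterA]
    | succ f => rw [pvOuterA]; simp [hlt]

-- B's flattened strided slices equal pvChunks, for b ≥ 1 (induction on a length bound)
theorem pvB_spec (b : Nat) (hb : 1 ≤ b) (n : Nat) :
    ∀ (cs : List Char), cs.length ≤ n →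
    (List.map (fun k => (cs.drop (2 * b * k)).take b)
        (List.range (if (0:Int) < (cs.length : Int)
          then (((cs.length : Int) - 0 + 2 * b - 1) / (2 * b)).toNat else 0))).flatten
      = pvChunks b cs := by
  induction n with
  | zero =>
      intro cs hcs
      have : cs = [] := List.eq_nil_of_length_eq_zero (by omega)
      subst this
      simp [pvChunks]
  | succ n ih =>
  intro l hcs
  rcases heq : l with _ | ⟨c, cs'⟩
  · simp [pvChunks]
  · rw [← heq]
    have hlen : 1 ≤ l.length := by rw [heq]; simp
    have hpos : (0:Int) < (l.length : Int) := by exact_mod_cast hlen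
    -- the range length is n' + 1 where n' is the range length for l.drop (2*b)
    have hn : (((l.length : Int) - 0 + 2 * b - 1) / (2 * b)).toNat
        = (if (0:Int) < ((l.drop (2*b)).length : Int)
            then ((((l.drop (2*b)).length : Int) - 0 + 2 * b - 1) / (2 * b)).toNat else 0) + 1 := by
      have hL : ((l.drop (2*b)).length) = l.length - 2 * b := by simp
      rcases Nat.lt_or_ge (l.length) (2*b + 1) with hsm | hbg
      · have h0 : (l.drop (2*b)).length = 0 := by omega
        have hnp : ¬ (0:Int) < (((l.drop (2*b)).length : Int)) := by rw [h0]; simp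
        rw [if_neg hnp]
        have e1 : ((l.length : Int) - 0 + 2*b - 1) = ((l.length - 1 : Nat) : Int) + (2*(b:Int)) * 1 := by push_cast; omega
        rw [e1, Int.add_mul_ediv_left _ _ (by positivity : (2*(b:Int)) ≠ 0)]
        have e2 : ((l.length - 1 : Nat) : Int) / (2*(b:Int)) = (((l.length - 1) / (2*b) : Nat) : Int) := by
          exact_mod_cast (Int.natCast_ediv (l.length - 1) (2*b)).symm
        rw [e2]
        have : (l.length - 1) / (2*b) = 0 := Nat.div_eq_of_lt (by omega)
        omega
      · have hp : (0:Int) < (((l.drop (2*b)).length : Int)) := by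
          rw [hL]; exact_mod_cast (by omega : 0 < l.length - 2*b)
        rw [if_pos hp, hL]
        have e1 : ((l.length : Int) - 0 + 2*b - 1) = (((l.length - 2*b : Nat) : Int) - 0 + 2*b - 1) + (2*(b:Int)) * 1 := by push_cast; omega
        rw [e1, Int.add_mul_ediv_left _ _ (by positivity : (2*(b:Int)) ≠ 0)]
        have hge : (0:Int) ≤ (((l.length - 2*b : Nat) : Int) - 0 + 2*b - 1) := by push_cast; omega
        have hqge : 0 ≤ (((l.length - 2*b : Nat) : Int) - 0 + 2*b - 1) / (2*(b:Int)) :=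
          Int.ediv_nonneg hge (by positivity)
        omega
    rw [if_pos hpos, hn, List.range_succ_eq_map]
    simp only [List.map_cons, List.map_map, List.flatten_cons]
    have hshift : ∀ k, ((fun k => (l.drop (2 * b * k)).take b) ∘ Nat.succ) k
        = (fun k => ((l.drop (2*b)).drop (2 * b * k)).take b) k := by
      intro k
      simp only [Function.comp, List.drop_drop]
      congr 2
      rw [Nat.succ_eq_add_one]
      ring
    rw [List.map_congr_left (fun k _ => hshift k)]
    rw [ih (l.drop (2*b)) (by simp; omega)]
    have hne : ¬ (l = [] ∨ b = 0) := by
      push_neg; exact ⟨by rw [heq]; simp, by omega⟩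
    conv_rhs => rw [pvChunks]
    rw [dif_neg hne]
    simp

-- unfold B's port into the flattened-map form
theorem pvB_port_eq (word : String) (bl : Int) (hb : 1 ≤ bl) :
    remove_odd_blocks_alt word bl
      = String.mk (List.map (fun k => (word.toList.drop (2 * bl.toNat * k)).take bl.toNat)
          (List.range (if (0:Int) < (word.toList.length : Int)
            then (((word.toList.length : Int) - 0 + 2 * bl.toNat - 1) / (2 * bl.toNat)).toNat else 0))).flatten := by
  show String.mk (((PySem.List.pyRange 0 (word.toList.length : Int) (2 * bl)).foldl
      (fun parts i => parts ++ [PySem.List.slice word.toList (some i) (some (i + bl))]) []).flatten) = _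
  have hbl : bl = (bl.toNat : Int) := by omega
  rw [hbl]
  set cs := word.toList with hcs
  set B := bl.toNat with hB
  rw [PySem.List.foldl_append_singleton_eq_map
        (fun i => PySem.List.slice cs (some i) (some (i + (B : Int))))]
  simp only [List.nil_append]
  have hstep : (0:Int) < 2 * (B : Int) := by omega
  rw [PySem.List.pyRange_of_pos 0 (cs.length : Int) hstep]
  rw [List.map_map]
  simp only [Int.toNat_natCast]
  congr 1
  refine congrArg List.flatten (List.map_congr_left ?_)
  intro k _
  simp only [Function.comp]
  have h1 : (0 : Int) + 2 * (B : Int) * (k : Int) = ((2 * B * k : Nat) : Int) := by push_cast; ring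
  have h2 : ((2 * B * k : Nat) : Int) + (B : Int) = ((2 * B * k + B : Nat) : Int) := by push_cast; ring
  rw [h1, h2, PySem.List.slice_natCast]
  congr 1
  omega

-- ===== VERDICT (by name: the statement is the Claim_ definition above) =====
theorem remove_odd_blocks_spec : Claim_equal_remove_odd_blocks := by
  intro word bl _ hpre
  unfold Spec_remove_odd_blocks
  rcases hpre with hb | ⟨hw, hneg⟩
  · rw [pvB_port_eq word bl hb]
    unfold remove_odd_blocks
    rw [pvOuterA_spec word.toList bl hb word.toList.length 0 [] (by omega)]
    rw [List.drop_zero, List.nil_append]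
    rw [pvB_spec bl.toNat (by omega) word.toList.length word.toList (le_refl _)]
  · subst hw
    unfold remove_odd_blocks remove_odd_blocks_alt
    have h0 : PySem.List.pyRange 0 0 (2 * bl) = [] := by
      simp [PySem.List.pyRange]
    simp [h0, pvOuterA]
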